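-- pv_equiv track=rewrite | github.com/ardevd/ha-dimo | custom_components/dimo/dimoapi/dimo_client.py | hex_to_permissions
-- ===== SOURCE A (Python) =====
-- def hex_to_permissions(hex_value):
--     """
--     Convert a hex–encoded permission value into a list of permission levels.
--     """
--     num = int(hex_value, 0)
--     num >>= 2
--
--     bin_str = bin(num)[2:]
--
--     # Ensure an even number of bits by padding with a leading zero if needed.
--     if len(bin_str) % 2 != 0:
--         bin_str = "0" + bin_str
--
--     permissions = []
--     group_count = len(bin_str) // 2
--
--     # Process each group from right to left.
--     # The right–most group corresponds to permission level 1, the next to level 2, etc.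
--     for i in range(group_count):
--         start = len(bin_str) - 2 * (i + 1)
--         end = len(bin_str) - 2 * i
--         group = bin_str[start:end]
--         # If the 2–bit group is nonzero, the permission is granted.
--         if int(group, 2) != 0:
--             permissions.append(i + 1)
--
--     return permissions
-- ===== SOURCE B (Python) =====
-- def hex_to_permissions(hex_value):
--     """
--     Convert a hex-encoded permission value into a list of permission levels.
--     """
--     num = int(hex_value, 0)
--     num >>= 2
--     permissions = []
--     level = 1
--     while num:
--         if num & 3:
--             permissions.append(level)
--         num >>= 2
--         level += 1
--     return permissions
-- ===== Notes on version B (the rewrite author's own statement) =====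
-- stated objective: simpler
-- what changed: Drops the padded binary-string construction and slice-index bookkeeping entirely; B walks the integer itself with a mask-and-shift while-loop (num & 3, num >>= 2), maintaining only the shrinking integer and a level counter.
import Mathlib
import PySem

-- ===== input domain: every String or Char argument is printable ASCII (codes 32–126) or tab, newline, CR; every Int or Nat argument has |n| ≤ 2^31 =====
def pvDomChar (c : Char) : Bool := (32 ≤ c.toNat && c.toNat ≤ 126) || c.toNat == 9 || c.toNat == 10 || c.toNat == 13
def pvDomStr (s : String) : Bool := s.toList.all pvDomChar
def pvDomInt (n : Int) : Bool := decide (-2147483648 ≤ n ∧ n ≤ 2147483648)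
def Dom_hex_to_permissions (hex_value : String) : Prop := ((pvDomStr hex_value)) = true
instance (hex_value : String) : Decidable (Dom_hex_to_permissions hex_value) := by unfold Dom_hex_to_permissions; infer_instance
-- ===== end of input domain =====

-- B replaces A's padded binary-string construction and per-group slicing by a mask-and-shift
-- while-loop on the integer itself (objective: simpler).

-- ===== PORT A =====

-- bin(n) for n ≥ 0 (Python's bin builtin): "0b" followed by the binary digits, MSB first
def pyBinGo (n : Nat) (acc : List Char) : List Char :=
  if n = 0 then acc
  else pyBinGo (n / 2) ((if n % 2 = 1 then '1' else '0') :: acc)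
decreasing_by exact Nat.div_lt_self (Nat.pos_of_ne_zero (by assumption)) (by omega)

def pyBin (n : Nat) : List Char :=
  '0' :: 'b' :: (if n = 0 then ['0'] else pyBinGo n [])

-- one iteration of A's for-loop body: slice the 2-bit group out, int(group, 2), append i+1
def aStep (bs : List Char) (acc : List Int) (i : Nat) : List Int :=
  let group := PySem.List.slice bs (some ((bs.length : Int) - 2 * ((i : Int) + 1)))
                                   (some ((bs.length : Int) - 2 * (i : Int)))
  match PySem.Int.ofCharsBase? group 2 with
  | some g => if g ≠ 0 then acc ++ [(i : Int) + 1] else acc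
  | none => acc   -- unreachable here (groups are binary digits); Python would raise ValueError

def hex_to_permissions (hex_value : String) : List Int :=
  match PySem.Int.ofStrBase? hex_value 0 with
  | none => []   -- int(hex_value, 0) raises ValueError; excluded by Pre_
  | some v =>
    let num := PySem.Int.floordiv v 4          -- num >>= 2
    if num < 0 then []  -- bin(num) = "-0b…", so int(group, 2) later raises; excluded by Pre_
    else
      let bin_str := PySem.List.slice (pyBin num.toNat) (some 2) none   -- bin(num)[2:]
      let bin_str := if bin_str.length % 2 ≠ 0 then '0' :: bin_str else bin_str
      (List.range (bin_str.length / 2)).foldl (aStep bin_str) []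

-- ===== PORT B =====

-- B's while-loop: num & 3 is num % 4, num >>= 2 is num / 4 on a nonnegative num
def altLoop (num : Nat) (level : Int) (acc : List Int) : List Int :=
  if num = 0 then acc
  else altLoop (num / 4) (level + 1) (if num % 4 ≠ 0 then acc ++ [level] else acc)
decreasing_by exact Nat.div_lt_self (Nat.pos_of_ne_zero (by assumption)) (by omega)

def hex_to_permissions_alt (hex_value : String) : List Int :=
  match PySem.Int.ofStrBase? hex_value 0 with
  | none => []   -- int(hex_value, 0) raises ValueError; excluded by Pre_
  | some v =>
    let num := PySem.Int.floordiv v 4          -- num >>= 2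
    -- Python's 'while num:' never terminates for num < 0 (excluded by Pre_); loop on the Nat value
    altLoop num.toNat 1 []

-- ===== PRECONDITION & SPEC =====
-- Pre_: int(hex_value, 0) parses and the parsed value is nonnegative.  On a non-parsing string A
-- raises ValueError; on a negative value A raises ValueError on int('b…', 2) and B's while-loop
-- does not terminate, so neither returns.
def Pre_hex_to_permissions (hex_value : String) : Prop :=
  0 ≤ (PySem.Int.ofStrBase? hex_value 0).getD (-1)
instance (hex_value : String) : Decidable (Pre_hex_to_permissions hex_value) := by
  unfold Pre_hex_to_permissions; infer_instance

def pvWitness_hex_to_permissions : String := "0x3f63"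

def Spec_hex_to_permissions (hex_value : String) (out : List Int) : Prop := out = hex_to_permissions_alt hex_value
instance (hex_value : String) (out : List Int) : Decidable (Spec_hex_to_permissions hex_value out) := by unfold Spec_hex_to_permissions; infer_instance

-- ===== CLAIM (what is proved, stated in full; the proofs are below) =====
def Claim_equal_hex_to_permissions : Prop := ∀ (hex_value : String), Dom_hex_to_permissions hex_value → Pre_hex_to_permissions hex_value → Spec_hex_to_permissions hex_value (hex_to_permissions hex_value)

-- ===== LEMMAS AND PROOFS =====

-- the common shape of both results, by recursion on the integer
def permSpec (n : Nat) : List Int :=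
  if n = 0 then []
  else (if n % 4 ≠ 0 then [(1 : Int)] else []) ++ (permSpec (n / 4)).map (· + 1)
decreasing_by exact Nat.div_lt_self (Nat.pos_of_ne_zero (by assumption)) (by omega)

def digChar (a : Nat) : Char := if a = 1 then '1' else '0'

def binDigits (n : Nat) : List Char := if n = 0 then ['0'] else pyBinGo n []

def padBin (n : Nat) : List Char :=
  if (binDigits n).length % 2 ≠ 0 then '0' :: binDigits n else binDigits n

def Alist (bs : List Char) : List Int := (List.range (bs.length / 2)).foldl (aStep bs) []

def gA (bs : List Char) (i : Nat) : List Int :=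
  match PySem.Int.ofCharsBase? (PySem.List.slice bs (some ((bs.length : Int) - 2 * ((i : Int) + 1)))
                                   (some ((bs.length : Int) - 2 * (i : Int)))) 2 with
  | some g => if g ≠ 0 then [(i : Int) + 1] else []
  | none => []

theorem flatMap_congr_mem {α β : Type} (l : List α) (f g : α → List β)
    (h : ∀ x ∈ l, f x = g x) : l.flatMap f = l.flatMap g := by
  induction l with
  | nil => rfl
  | cons x xs ih =>
    simp only [List.flatMap_cons]
    rw [h x (by simp), ih (fun y hy => h y (by simp [hy]))]

theorem aStep_eq_append (bs : List Char) (acc : List Int) (i : Nat) :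
    aStep bs acc i = acc ++ gA bs i := by
  unfold aStep gA
  cases h : PySem.Int.ofCharsBase? (PySem.List.slice bs (some ((bs.length : Int) - 2 * ((i : Int) + 1)))
      (some ((bs.length : Int) - 2 * (i : Int)))) 2 with
  | none => simp [h]
  | some g => simp only [h]; split <;> simp

theorem Alist_flatMap (bs : List Char) :
    Alist bs = (List.range (bs.length / 2)).flatMap (gA bs) := by
  unfold Alist
  have key : ∀ (l : List Nat) (acc : List Int),
      l.foldl (aStep bs) acc = acc ++ l.flatMap (gA bs) := by
    intro l
    induction l with
    | nil => simp
    | cons x xs ih => intro acc; simp [List.foldl_cons, aStep_eq_append, ih]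
  simpa using key (List.range (bs.length / 2)) []

theorem pyBinGo_acc (n : Nat) : ∀ acc, pyBinGo n acc = pyBinGo n [] ++ acc := by
  induction n using Nat.strong_induction_on with
  | _ n ih =>
    intro acc
    by_cases h : n = 0
    · simp [pyBinGo, h]
    · have hlt : n / 2 < n := Nat.div_lt_self (Nat.pos_of_ne_zero h) (by omega)
      rw [pyBinGo, if_neg h, ih _ hlt]
      conv_rhs => rw [pyBinGo, if_neg h, ih _ hlt]
      simp

theorem binDigits_ge2 (n : Nat) (h : 2 ≤ n) :
    binDigits n = binDigits (n / 2) ++ [digChar (n % 2)] := by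
  unfold binDigits
  rw [if_neg (by omega), if_neg (by omega)]
  rw [pyBinGo, if_neg (by omega), pyBinGo_acc]
  unfold digChar
  rfl

theorem binDigits_ge4 (n : Nat) (h : 4 ≤ n) :
    binDigits n = binDigits (n / 4) ++ [digChar (n / 2 % 2), digChar (n % 2)] := by
  rw [binDigits_ge2 n (by omega), binDigits_ge2 (n / 2) (by omega),
    Nat.div_div_eq_div_mul]
  simp

theorem padBin_even (n : Nat) : (padBin n).length % 2 = 0 := by
  unfold padBin
  split
  · simp only [List.length_cons]; omega
  · omega

theorem padBin_ge4 (n : Nat) (h : 4 ≤ n) :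
    padBin n = padBin (n / 4) ++ [digChar (n / 2 % 2), digChar (n % 2)] := by
  unfold padBin
  rw [binDigits_ge4 n h]
  by_cases hp : (binDigits (n / 4)).length % 2 = 0 <;> simp [hp]

theorem slice_append_two (bs : List Char) (c d : Char) (a b : Nat)
    (hab : a ≤ b) (hb : b ≤ bs.length) :
    PySem.List.slice (bs ++ [c, d]) (some (a : Int)) (some (b : Int)) =
    PySem.List.slice bs (some (a : Int)) (some (b : Int)) := by
  rw [PySem.List.slice_natCast, PySem.List.slice_natCast,
    List.drop_append_of_le_length (le_trans hab hb),
    List.take_append_of_le_length (by simp [List.length_drop]; omega)]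

theorem gA_zero (bs : List Char) (a b : Nat) (ha : a < 2) (hb : b < 2) :
    gA (bs ++ [digChar a, digChar b]) 0 = if 2 * a + b ≠ 0 then [(1 : Int)] else [] := by
  unfold gA
  have e1 : ((bs ++ [digChar a, digChar b]).length : Int) - 2 * (((0 : Nat) : Int) + 1)
      = ((bs.length : Nat) : Int) := by
    simp only [List.length_append, List.length_cons, List.length_nil, Nat.cast_zero]
    push_cast; ring
  have e2 : ((bs ++ [digChar a, digChar b]).length : Int) - 2 * ((0 : Nat) : Int)
      = ((bs.length + 2 : Nat) : Int) := by
    simp only [List.length_append, List.length_cons, List.length_nil, Nat.cast_zero]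
    ring
  rw [e1, e2, PySem.List.slice_natCast, List.drop_left,
    show bs.length + 2 - bs.length = 2 from by omega]
  interval_cases a <;> interval_cases b <;> decide

theorem gA_succ (bs : List Char) (c d : Char) (i : Nat)
    (hev : bs.length % 2 = 0) (hi : i < bs.length / 2) :
    gA (bs ++ [c, d]) (i + 1) = (gA bs i).map (· + 1) := by
  unfold gA
  have hL : (bs ++ [c, d]).length = bs.length + 2 := by simp
  have e1 : ((bs ++ [c, d]).length : Int) - 2 * (((i + 1 : Nat) : Int) + 1)
      = ((bs.length - 2 * (i + 1) : Nat) : Int) := by rw [hL]; push_cast [Nat.sub_add_cancel]; omega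
  have e2 : ((bs ++ [c, d]).length : Int) - 2 * ((i + 1 : Nat) : Int)
      = ((bs.length - 2 * i : Nat) : Int) := by rw [hL]; push_cast; omega
  have e3 : ((bs.length : Int)) - 2 * (((i : Nat) : Int) + 1)
      = ((bs.length - 2 * (i + 1) : Nat) : Int) := by push_cast; omega
  have e4 : ((bs.length : Int)) - 2 * ((i : Nat) : Int)
      = ((bs.length - 2 * i : Nat) : Int) := by push_cast; omega
  rw [e1, e2, e3, e4,
    slice_append_two bs c d _ _ (by omega) (by omega)]
  cases h : PySem.Int.ofCharsBase? (PySem.List.slice bs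
      (some ((bs.length - 2 * (i + 1) : Nat) : Int)) (some ((bs.length - 2 * i : Nat) : Int))) 2 with
  | none => simp
  | some g => simp only [h]; split <;> simp

theorem Alist_append (bs : List Char) (a b : Nat) (ha : a < 2) (hb : b < 2)
    (hev : bs.length % 2 = 0) :
    Alist (bs ++ [digChar a, digChar b]) =
      (if 2 * a + b ≠ 0 then [(1 : Int)] else []) ++ (Alist bs).map (· + 1) := by
  rw [Alist_flatMap, Alist_flatMap]
  have hL : (bs ++ [digChar a, digChar b]).length / 2 = bs.length / 2 + 1 := by
    simp only [List.length_append, List.length_cons, List.length_nil]; omega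
  rw [hL, List.range_succ_eq_map, List.flatMap_cons, gA_zero bs a b ha hb]
  congr 1
  rw [List.flatMap_map,
    flatMap_congr_mem _ _ (fun i => (gA bs i).map (· + 1))
      (fun i hi => gA_succ bs _ _ i hev (List.mem_range.mp hi)),
    ← List.map_flatMap]

theorem Alist_padBin (n : Nat) : Alist (padBin n) = permSpec n := by
  induction n using Nat.strong_induction_on with
  | _ n ih =>
    by_cases h4 : n < 4
    · interval_cases n <;>
        simp [Alist, padBin, binDigits, pyBinGo, aStep, permSpec, List.range_succ] <;> decide
    · rw [padBin_ge4 n (by omega),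
        Alist_append (padBin (n / 4)) (n / 2 % 2) (n % 2) (by omega) (by omega) (padBin_even _),
        ih (n / 4) (by omega)]
      conv_rhs => rw [permSpec, if_neg (by omega : ¬ n = 0)]
      congr 1
      have he : (2 * (n / 2 % 2) + n % 2 ≠ 0) ↔ (n % 4 ≠ 0) := by omega
      simp only [he]

theorem altLoop_eq (n : Nat) : ∀ (i : Int) (acc : List Int),
    altLoop n i acc = acc ++ (permSpec n).map (· + (i - 1)) := by
  induction n using Nat.strong_induction_on with
  | _ n ih =>
    intro i acc
    by_cases h : n = 0
    · rw [altLoop, if_pos h]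
      conv_rhs => rw [permSpec]
      simp [h]
    · rw [altLoop, if_neg h, ih (n / 4) (Nat.div_lt_self (Nat.pos_of_ne_zero h) (by omega))]
      conv_rhs => rw [permSpec, if_neg h]
      simp only [List.map_append, List.map_map]
      have hmap : List.map (fun x => x + (i + 1 - 1)) (permSpec (n / 4))
          = List.map ((fun x => x + (i - 1)) ∘ fun x => x + 1) (permSpec (n / 4)) := by
        apply List.map_congr_left
        intro x _
        simp only [Function.comp]
        ring
      rw [hmap]
      by_cases hc : n % 4 ≠ 0
      · simp only [if_pos hc]
        have : (1 : Int) + (i - 1) = i := by ring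
        simp [this]
      · simp only [if_neg hc]
        simp

theorem bin_str_eq (n : Nat) :
    PySem.List.slice (pyBin n) (some 2) none = binDigits n := by
  have h := PySem.List.slice_from_natCast (pyBin n) 2
  rw [show ((2 : Nat) : Int) = (2 : Int) from rfl] at h
  rw [h]
  unfold pyBin binDigits
  split <;> rfl

-- ===== VERDICT (by name: the statement is the Claim_ definition above) =====
theorem hex_to_permissions_spec : Claim_equal_hex_to_permissions := by
  intro hex_value _ hpre
  unfold Spec_hex_to_permissions hex_to_permissions hex_to_permissions_alt
  unfold Pre_hex_to_permissions at hpre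
  rcases h : PySem.Int.ofStrBase? hex_value 0 with _ | v
  · simp only [h]
  · simp only [h, Option.getD_some] at hpre
    have hdiv : PySem.Int.floordiv v 4 = v / 4 :=
      PySem.Int.floordiv_eq_ediv_of_pos (by omega)
    have hnn : ¬ PySem.Int.floordiv v 4 < 0 := by
      rw [hdiv]; omega
    simp only [if_neg hnn, bin_str_eq]
    have hA : (List.range ((if (binDigits (PySem.Int.floordiv v 4).toNat).length % 2 ≠ 0
          then '0' :: binDigits (PySem.Int.floordiv v 4).toNat
          else binDigits (PySem.Int.floordiv v 4).toNat).length / 2)).foldl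
        (aStep (if (binDigits (PySem.Int.floordiv v 4).toNat).length % 2 ≠ 0
          then '0' :: binDigits (PySem.Int.floordiv v 4).toNat
          else binDigits (PySem.Int.floordiv v 4).toNat)) []
        = permSpec (PySem.Int.floordiv v 4).toNat := Alist_padBin _
    rw [hA, altLoop_eq]
    simp
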